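-- pv_equiv track=rewrite | github.com/Unvire/BetterBoardNavigator | Loaders/odbPlusPlusLoader.py | _getPinsOnNet
-- ===== SOURCE A (Python) =====
-- def _getPinsOnNet(fileLines:list[str], i:int) -> tuple[int, dict]:
--     newNetData = {}
--     while i < len(fileLines) and '#' not in fileLines[i]:
--         if 'SNT TOP' in fileLines[i][:7]:
--             *_, componentID, pinID = fileLines[i].split(' ')
--             if not componentID in newNetData:
--                 newNetData[componentID] = []
--             newNetData[componentID].append(pinID)
--         i += 1
--     return i, newNetData
-- ===== SOURCE B (Python) =====
-- def _getPinsOnNet(fileLines, i):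
--     # pass 1: advance j to the block's end (first '#' line or EOF)
--     j = i
--     while j < len(fileLines) and '#' not in fileLines[j]:
--         j += 1
--     # pass 2: extract (component, pin) pairs as a flat relation
--     pairs = []
--     for line in fileLines[i:j]:
--         if line.startswith('SNT TOP'):
--             parts = line.split(' ')
--             pairs.append((parts[-2], parts[-1]))
--     # pass 3: first-occurrence order of the component ids
--     order = []
--     for componentID, _ in pairs:
--         if componentID not in order:
--             order.append(componentID)
--     # relational grouping: per component, gather its pins from the relation
--     return j, {c: [p for cc, p in pairs if cc == c] for c in order}
-- ===== Notes on version B (the rewrite author's own statement) =====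
-- stated objective: alternative
-- what changed: A's single advance-and-group while loop with incremental dict mutation is replaced by relational grouping: advance an index to the block end, extract a flat (component, pin) pair relation, compute first-occurrence key order, then build each component's pin list by a per-key scan of the relation (a dict comprehension) instead of A's in-place not-in/assign/append dict updates.
-- outside the precondition, e.g. on _getPinsOnNet(['SNT TOP c p', 'x'], -1): A returns (2, {'c': ['p']}), B returns (2, {}); on _getPinsOnNet(['a'], -5): A raises IndexError, B raises IndexError
import Mathlib
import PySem

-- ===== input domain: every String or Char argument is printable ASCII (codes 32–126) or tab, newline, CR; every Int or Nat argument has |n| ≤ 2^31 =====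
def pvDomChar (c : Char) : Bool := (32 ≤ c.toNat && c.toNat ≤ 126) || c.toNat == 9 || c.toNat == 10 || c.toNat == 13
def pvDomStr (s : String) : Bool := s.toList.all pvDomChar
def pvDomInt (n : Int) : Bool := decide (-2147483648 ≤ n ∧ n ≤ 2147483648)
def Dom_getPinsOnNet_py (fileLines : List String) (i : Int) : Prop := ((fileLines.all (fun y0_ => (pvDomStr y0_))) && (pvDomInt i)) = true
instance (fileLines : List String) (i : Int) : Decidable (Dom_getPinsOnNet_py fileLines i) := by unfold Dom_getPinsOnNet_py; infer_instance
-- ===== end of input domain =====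

-- B replaces A's advance-and-group loop with incremental dict mutation by relational grouping
-- (block end, flat pair relation, first-occurrence key order, per-key scans); objective: alternative.

-- ===== PORT A =====
-- while loop ported as fuel recursion; fuel = (len - i).toNat bounds the remaining iterations exactly.
def pvAloop (fileLines : List String) : Nat → Int → PySem.Dict String (List String) → Int × PySem.Dict String (List String)
  | 0, i, d => (i, d)
  | fuel+1, i, d =>
    if i < (fileLines.length : Int) then
      match PySem.List.pyGet? fileLines i with
      | none => (i, d)  -- IndexError (only for i < -len, excluded by Pre_)
      | some line =>
        if PySem.Str.isIn "#" line then (i, d)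
        else
          let d' :=
            if PySem.Str.isIn "SNT TOP" (PySem.Str.slice line none (some 7)) then
              -- '*_, componentID, pinID = line.split(' ')': the last two pieces. Python would raise
              -- ValueError on fewer than 2 pieces; unreachable (the line starts with 'SNT TOP', which
              -- contains a space), so the .getD "" defaults are dead code.
              let parts := (PySem.Str.split? line " ").getD []
              let componentID := (PySem.List.pyGet? parts (-2)).getD ""
              let pinID := (PySem.List.pyGet? parts (-1)).getD ""
              let d1 := if d.contains componentID then d else d.insert componentID []
              d1.insert componentID (d1.getD componentID [] ++ [pinID])
            else d
          pvAloop fileLines fuel (i+1) d'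
    else (i, d)

def getPinsOnNet_py (fileLines : List String) (i : Int) : Int × (List (String × List String)) :=
  let r := pvAloop fileLines ((fileLines.length : Int) - i).toNat i PySem.Dict.empty
  (r.1, r.2.items)

-- ===== PORT B =====
-- pass 1 of Source B: the plain 'while j < len and "#" not in fileLines[j]: j += 1' as fuel recursion.
def pvBend (fileLines : List String) : Nat → Int → Int
  | 0, j => j
  | fuel+1, j =>
    if j < (fileLines.length : Int) then
      match PySem.List.pyGet? fileLines j with
      | none => j  -- IndexError (only for j < -len, excluded by Pre_)
      | some line => if PySem.Str.isIn "#" line then j else pvBend fileLines fuel (j+1)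
    else j

def getPinsOnNet_py_alt (fileLines : List String) (i : Int) : Int × (List (String × List String)) :=
  let j := pvBend fileLines ((fileLines.length : Int) - i).toNat i
  -- pass 2: the pair relation over fileLines[i:j]
  let pairs := (PySem.List.slice fileLines (some i) (some j)).foldl (fun acc line =>
      if PySem.Str.startswith line "SNT TOP" then
        let parts := (PySem.Str.split? line " ").getD []
        acc ++ [(((PySem.List.pyGet? parts (-2)).getD ""), ((PySem.List.pyGet? parts (-1)).getD ""))]
      else acc) []
  -- pass 3: first-occurrence order ('if componentID not in order: order.append(componentID)')
  let order := pairs.foldl (fun o p => PySem.Set.add o p.1) PySem.Set.empty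
  -- dict comprehension over distinct keys: per-key scan of the relation
  (j, order.map (fun c => (c, (pairs.filter (fun p => p.1 == c)).map (·.2))))

-- ===== PRECONDITION & SPEC =====
-- Pre_ excludes negative start indices, which are outside the natural domain of a line index into the
-- file: for i < -len(fileLines) A raises IndexError, and for -len ≤ i < 0 A's value is an accident of
-- negative-index wraparound followed by a restart from index 0 (B reads the plain suffix there).
def Pre_getPinsOnNet_py (fileLines : List String) (i : Int) : Prop := 0 ≤ i
instance (fileLines : List String) (i : Int) : Decidable (Pre_getPinsOnNet_py fileLines i) := by unfold Pre_getPinsOnNet_py; infer_instance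

def pvWitness_getPinsOnNet_py : List String × Int := (["SNT TOP C1 P1", "SNT TOP C1 P2", "#End"], 0)

def Spec_getPinsOnNet_py (fileLines : List String) (i : Int) (out : Int × (List (String × List String))) : Prop := out = getPinsOnNet_py_alt fileLines i
instance (fileLines : List String) (i : Int) (out : Int × (List (String × List String))) : Decidable (Spec_getPinsOnNet_py fileLines i out) := by unfold Spec_getPinsOnNet_py; infer_instance

-- ===== CLAIM (what is proved, stated in full; the proofs are below) =====
def Claim_equal_getPinsOnNet_py : Prop := ∀ (fileLines : List String) (i : Int), Dom_getPinsOnNet_py fileLines i → Pre_getPinsOnNet_py fileLines i → Spec_getPinsOnNet_py fileLines i (getPinsOnNet_py fileLines i)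

-- ===== LEMMAS AND PROOFS =====

-- A's "'SNT TOP' in line[:7]" is exactly "line.startswith('SNT TOP')" (the pattern has length 7).
lemma pv_test_eq (line : String) :
    PySem.Str.isIn "SNT TOP" (PySem.Str.slice line none (some 7)) = PySem.Str.startswith line "SNT TOP" := by
  have h7 : (PySem.Str.slice line none (some 7)).toList = line.toList.take 7 := by
    rw [PySem.Str.toList_slice, PySem.Chars.slice_eq_listSlice,
      PySem.List.slice_to line.toList (b := 7) (by omega)]
    rfl
  rw [Bool.eq_iff_iff, PySem.Str.isIn_iff_infix, h7, PySem.Str.startswith_eq,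
    PySem.Chars.startswith_iff]
  constructor
  · intro hinf
    have heq : ("SNT TOP".toList) = line.toList.take 7 :=
      hinf.sublist.eq_of_length (by have := hinf.length_le; simp at this ⊢; omega)
    exact heq ▸ List.take_prefix 7 line.toList
  · intro hpre
    have heq : ("SNT TOP".toList) = line.toList.take 7 := by
      have h := List.prefix_iff_eq_take.mp hpre
      simpa using h
    rw [heq]

-- A's "if componentID not in d: d[componentID] = []" + append is Dict.modify with default [].
lemma pv_update_eq (d : PySem.Dict String (List String)) (k : String) (v : String) :
    (let d1 := if d.contains k then d else d.insert k []
     d1.insert k (d1.getD k [] ++ [v])) = PySem.Dict.modify d k [] (fun ps => ps ++ [v]) := by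
  rcases hc : d.contains k with _ | _
  · simp only [Bool.false_eq_true, if_false, PySem.Dict.modify,
      PySem.Dict.getD_insert_self, PySem.Dict.insert_insert_self,
      PySem.Dict.getD_of_not_contains d [] hc, List.nil_append]
  · simp [PySem.Dict.modify]

-- the projections of an 'SNT TOP' line, named for the statements below.
def pvKey (line : String) : String := (PySem.List.pyGet? ((PySem.Str.split? line " ").getD []) (-2)).getD ""
def pvPin (line : String) : String := (PySem.List.pyGet? ((PySem.Str.split? line " ").getD []) (-1)).getD ""

-- A's loop body, named for the induction.
def pvBstep (d : PySem.Dict String (List String)) (line : String) : PySem.Dict String (List String) :=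
  if PySem.Str.startswith line "SNT TOP" then
    PySem.Dict.modify d (pvKey line) [] (fun ps => ps ++ [pvPin line])
  else d

-- A's loop body equals pvBstep pointwise (test and dict update rewritten).
lemma pv_body_eq (dd : PySem.Dict String (List String)) (line : String) :
    (if PySem.Str.isIn "SNT TOP" (PySem.Str.slice line none (some 7)) then
      let parts := (PySem.Str.split? line " ").getD []
      let componentID := (PySem.List.pyGet? parts (-2)).getD ""
      let pinID := (PySem.List.pyGet? parts (-1)).getD ""
      let d1 := if dd.contains componentID then dd else dd.insert componentID []
      d1.insert componentID (d1.getD componentID [] ++ [pinID])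
    else dd) = pvBstep dd line := by
  rw [pv_test_eq line]
  simp only [pvBstep, pvKey, pvPin]
  split
  · exact pv_update_eq dd _ _
  · rfl

-- A's loop computes (i + |block|, fold of pvBstep over block) where block is the '#'-free prefix of drop i.
lemma pv_Aloop_eq (fileLines : List String) :
    ∀ (n : Nat) (i : Int) (d : PySem.Dict String (List String)), 0 ≤ i →
      (fileLines.length : Int) ≤ i + n →
      pvAloop fileLines n i d =
        (i + (((fileLines.drop i.toNat).takeWhile (fun l => !PySem.Str.isIn "#" l)).length : Int),
         ((fileLines.drop i.toNat).takeWhile (fun l => !PySem.Str.isIn "#" l)).foldl pvBstep d) := by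
  intro n
  induction n with
  | zero =>
    intro i d hi hfuel
    have hdrop : fileLines.drop i.toNat = [] := by
      apply List.drop_eq_nil_of_le; omega
    simp [pvAloop, hdrop]
  | succ n ih =>
    intro i d hi hfuel
    by_cases hlt : i < (fileLines.length : Int)
    · have hidx : i.toNat < fileLines.length := by omega
      have hget : PySem.List.pyGet? fileLines i = some fileLines[i.toNat] := by
        have h1 := PySem.List.pyGet?_natCast fileLines i.toNat
        rw [Int.toNat_of_nonneg hi] at h1
        rw [h1, List.getElem?_eq_getElem hidx]
      have hdrop : fileLines.drop i.toNat = fileLines[i.toNat] :: fileLines.drop (i.toNat + 1) :=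
        List.drop_eq_getElem_cons hidx
      rcases hhash : PySem.Str.isIn "#" fileLines[i.toNat] with _ | _
      · have htail : fileLines.drop (i + 1).toNat = fileLines.drop (i.toNat + 1) := by
          congr 1; omega
        rw [pvAloop, if_pos hlt, hget]
        simp only [hhash, Bool.false_eq_true, if_false]
        rw [ih (i + 1) _ (by omega) (by omega), htail, hdrop, List.takeWhile_cons]
        simp only [hhash, Bool.not_false, if_true, List.length_cons, List.foldl_cons]
        rw [Prod.mk.injEq]
        constructor
        · omega
        · rw [pv_body_eq d fileLines[i.toNat]]
      · rw [pvAloop, if_pos hlt, hget, hdrop, List.takeWhile_cons]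
        simp only [hhash, if_true, Bool.not_true, Bool.false_eq_true, if_false, List.length_nil,
          List.foldl_nil, Nat.cast_zero, add_zero]
    · have hdrop : fileLines.drop i.toNat = [] := by
        apply List.drop_eq_nil_of_le; omega
      rw [pvAloop, if_neg hlt, hdrop]
      simp

-- B's boundary scan computes the same end index.
lemma pv_Bend_eq (fileLines : List String) :
    ∀ (n : Nat) (j : Int), 0 ≤ j → (fileLines.length : Int) ≤ j + n →
      pvBend fileLines n j =
        j + (((fileLines.drop j.toNat).takeWhile (fun l => !PySem.Str.isIn "#" l)).length : Int) := by
  intro n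
  induction n with
  | zero =>
    intro j hj hfuel
    have hdrop : fileLines.drop j.toNat = [] := by
      apply List.drop_eq_nil_of_le; omega
    simp [pvBend, hdrop]
  | succ n ih =>
    intro j hj hfuel
    by_cases hlt : j < (fileLines.length : Int)
    · have hidx : j.toNat < fileLines.length := by omega
      have hget : PySem.List.pyGet? fileLines j = some fileLines[j.toNat] := by
        have h1 := PySem.List.pyGet?_natCast fileLines j.toNat
        rw [Int.toNat_of_nonneg hj] at h1
        rw [h1, List.getElem?_eq_getElem hidx]
      have hdrop : fileLines.drop j.toNat = fileLines[j.toNat] :: fileLines.drop (j.toNat + 1) :=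
        List.drop_eq_getElem_cons hidx
      rcases hhash : PySem.Str.isIn "#" fileLines[j.toNat] with _ | _
      · have htail : fileLines.drop (j + 1).toNat = fileLines.drop (j.toNat + 1) := by
          congr 1; omega
        rw [pvBend, if_pos hlt, hget]
        simp only [hhash, Bool.false_eq_true, if_false]
        rw [ih (j + 1) (by omega) (by omega), htail, hdrop, List.takeWhile_cons]
        simp only [hhash, Bool.not_false, if_true, List.length_cons]
        omega
      · rw [pvBend, if_pos hlt, hget, hdrop, List.takeWhile_cons]
        simp only [hhash, if_true, Bool.not_true, Bool.false_eq_true, if_false, List.length_nil,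
          Nat.cast_zero, add_zero]
    · have hdrop : fileLines.drop j.toNat = [] := by
        apply List.drop_eq_nil_of_le; omega
      rw [pvBend, if_neg hlt, hdrop]
      simp

-- grouping: the items of the fold of pvBstep are B's relationally grouped list.
lemma pv_group_eq (block : List String) :
    (block.foldl pvBstep PySem.Dict.empty).items =
      (let pairs := block.foldl (fun acc line =>
          if PySem.Str.startswith line "SNT TOP" then acc ++ [(pvKey line, pvPin line)] else acc) []
       let order := pairs.foldl (fun o p => PySem.Set.add o p.1) PySem.Set.empty
       order.map (fun c => (c, (pairs.filter (fun p => p.1 == c)).map (·.2)))) := by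
  simp only
  rw [PySem.List.foldl_append_if (p := fun line => PySem.Str.startswith line "SNT TOP")
    (f := fun line => (pvKey line, pvPin line))]
  set flt := block.filter (fun line => PySem.Str.startswith line "SNT TOP") with hflt
  simp only [List.nil_append]
  -- A side: the fold in filter form, then over the mapped pair list
  have hA : block.foldl pvBstep PySem.Dict.empty =
      (flt.map (fun line => (pvKey line, pvPin line))).foldl
        (fun d p => PySem.Dict.modify d p.1 [] (fun ps => ps ++ [p.2])) PySem.Dict.empty := by
    rw [List.foldl_map]
    rw [hflt, ← PySem.List.foldl_if_eq_foldl_filter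
      (p := fun line => PySem.Str.startswith line "SNT TOP")
      (f := fun d line => PySem.Dict.modify d (pvKey line) [] (fun ps => ps ++ [pvPin line]))]
    apply PySem.List.foldl_congr_mem
    intro acc x _
    simp [pvBstep]
  rw [hA]
  set pairs := flt.map (fun line => (pvKey line, pvPin line)) with hpairs
  set d := pairs.foldl (fun d p => PySem.Dict.modify d p.1 [] (fun ps => ps ++ [p.2]))
    PySem.Dict.empty with hd
  have hnd : d.keys.Nodup := by
    rw [hd]
    exact PySem.Dict.nodup_keys_foldl_modify_key pairs (fun p => p.1) []
      (fun d p ps => ps ++ [p.2]) PySem.Dict.empty (by simp)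
  have hkeys : d.keys = pairs.foldl (fun o p => PySem.Set.add o p.1) PySem.Set.empty := by
    rw [hd, PySem.Dict.keys_foldl_modify_key]
    simp only [PySem.Dict.keys_empty, PySem.Set.update, PySem.Set.empty, List.foldl_map]
  rw [PySem.Dict.items_eq_map_keys d hnd [], hkeys]
  apply List.map_congr_left
  intro c _
  rw [hd, PySem.Dict.getD_foldl_modify_append]
  simp [PySem.Dict.getD_empty]

-- ===== VERDICT (by name: the statement is the Claim_ definition above) =====
theorem getPinsOnNet_py_spec : Claim_equal_getPinsOnNet_py := by
  intro fileLines i _hdom hpre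
  unfold Spec_getPinsOnNet_py getPinsOnNet_py getPinsOnNet_py_alt
  have hi : (0 : Int) ≤ i := hpre
  rw [pv_Aloop_eq fileLines (((fileLines.length : Int) - i).toNat) i PySem.Dict.empty hi (by omega)]
  rw [pv_Bend_eq fileLines (((fileLines.length : Int) - i).toNat) i hi (by omega)]
  set block := (fileLines.drop i.toNat).takeWhile (fun l => !PySem.Str.isIn "#" l) with hblock
  have hslice : PySem.List.slice fileLines (some i) (some (i + (block.length : Int))) = block := by
    rw [PySem.List.slice_toNat fileLines hi (by omega)]
    have h1 : (i + (block.length : Int)).toNat - i.toNat = block.length := by omega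
    rw [h1]
    have hpre' : block <+: fileLines.drop i.toNat := by rw [hblock]; exact List.takeWhile_prefix _
    exact (List.prefix_iff_eq_take.mp hpre').symm
  simp only [hslice]
  rw [Prod.mk.injEq]
  refine ⟨rfl, ?_⟩
  have := pv_group_eq block
  simp only at this
  rw [this]
  simp only [pvKey, pvPin]
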